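-- pv_equiv track=rewrite | github.com/Sichanvisit/cfd | backend/services/breakout_backfill_runner_scaffold.py | _merge_manual_rows
-- ===== SOURCE A (Python) =====
-- from typing import Any, Mapping, Sequence
--
-- def _to_text(value: object, default: str = "") -> str:
--     text = str(value or "").strip()
--     return text if text else str(default or "")
--
-- def _merge_manual_rows(
--     primary_rows: Sequence[Mapping[str, Any]],
--     supplemental_rows: Sequence[Mapping[str, Any]],
-- ) -> list[dict[str, Any]]:
--     merged: dict[str, dict[str, Any]] = {}
--     ordered_rows: list[dict[str, Any]] = []
--     for raw_row in list(primary_rows) + list(supplemental_rows):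
--         row = dict(raw_row)
--         key = _to_text(row.get("episode_id", row.get("annotation_id", "")), "")
--         if key and key in merged:
--             merged[key].update(row)
--             continue
--         if key:
--             merged[key] = row
--         ordered_rows.append(row)
--     return ordered_rows
-- ===== SOURCE B (Python) =====
-- def _merge_manual_rows(primary_rows, supplemental_rows):
--     rows = [dict(raw) for raw in list(primary_rows) + list(supplemental_rows)]
--
--     def _row_key(row):
--         text = str(row.get("episode_id", row.get("annotation_id", "")) or "").strip()
--         return text
--
--     # pass 1: build the key -> fully merged row table
--     table = {}
--     for row in rows:
--         key = _row_key(row)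
--         if not key:
--             continue
--         if key in table:
--             table[key] = {**table[key], **row}
--         else:
--             table[key] = row
--
--     # pass 2: emit keyed rows at their first occurrence, keyless rows as-is
--     out = []
--     seen = set()
--     for row in rows:
--         key = _row_key(row)
--         if not key:
--             out.append(dict(row))
--         elif key not in seen:
--             seen.add(key)
--             out.append(table[key])
--     return out
-- ===== Notes on version B (the rewrite author's own statement) =====
-- stated objective: alternative
-- what changed: B replaces A's single pass that appends aliased dicts to the output and mutates them via later .update calls with two aliasing-free passes: pass one builds a key->fully-merged-row table, pass two walks the rows again with a seen set, emitting the table entry at each key's first occurrence and keyless rows as fresh copies.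
import Mathlib
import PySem

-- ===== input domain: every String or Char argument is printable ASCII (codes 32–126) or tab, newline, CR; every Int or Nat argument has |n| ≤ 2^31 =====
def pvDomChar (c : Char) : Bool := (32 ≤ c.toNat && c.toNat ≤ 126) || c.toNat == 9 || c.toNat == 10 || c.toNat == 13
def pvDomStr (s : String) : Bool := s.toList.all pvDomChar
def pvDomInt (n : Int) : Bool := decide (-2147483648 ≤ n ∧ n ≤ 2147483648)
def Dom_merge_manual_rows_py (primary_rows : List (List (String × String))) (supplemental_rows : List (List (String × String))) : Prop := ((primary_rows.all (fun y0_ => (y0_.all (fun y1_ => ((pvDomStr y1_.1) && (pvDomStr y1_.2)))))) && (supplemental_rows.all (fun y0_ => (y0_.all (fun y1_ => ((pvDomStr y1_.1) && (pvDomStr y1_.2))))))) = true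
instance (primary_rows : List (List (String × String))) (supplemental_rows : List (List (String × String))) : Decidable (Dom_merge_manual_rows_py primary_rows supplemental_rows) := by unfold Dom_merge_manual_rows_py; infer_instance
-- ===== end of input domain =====

-- B separates index-building from emission (two passes with a table and a seen set) instead of
-- A's single pass that mutates dicts already appended to the output; same return value (A also
-- mutates no argument; the equivalence is about the return value, which aliasing cannot affect).

-- ===== PORT A =====
-- _to_text(value, default): value and default are strings here, so str(value or "") is value
-- when non-empty and "" otherwise — in both cases .strip() of it is .strip() of value;
-- str(default or "") is default itself (str of a string).
def pvToTextA (value : String) (dflt : String) : String :=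
  let text := PySem.Str.strip value
  if text == "" then dflt else text

-- key = _to_text(row.get("episode_id", row.get("annotation_id", "")), "")
def pvRowKeyA (row : PySem.Dict String String) : String :=
  pvToTextA (row.getD "episode_id" (row.getD "annotation_id" "")) ""

-- One iteration of A's loop. Python appends ALIASED dicts: a keyed row appended to
-- ordered_rows is the same object as merged[key] and is mutated by later .update calls.
-- We model ordered_rows as tags: `Sum.inl key` (resolved against the final `merged` at
-- return time, which is exactly what aliasing produces) or `Sum.inr row` for keyless rows.
def pvStepA (st : PySem.Dict String (PySem.Dict String String) × List (String ⊕ PySem.Dict String String))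
    (raw : List (String × String)) :
    PySem.Dict String (PySem.Dict String String) × List (String ⊕ PySem.Dict String String) :=
  let row := PySem.Dict.ofList raw                      -- row = dict(raw_row)
  let key := pvRowKeyA row
  if key != "" && st.1.contains key then
    (st.1.insert key ((st.1.getD key PySem.Dict.empty).update row.items), st.2)  -- merged[key].update(row); continue
  else if key != "" then
    (st.1.insert key row, st.2 ++ [Sum.inl key])        -- merged[key] = row; ordered_rows.append(row)
  else
    (st.1, st.2 ++ [Sum.inr row])                       -- ordered_rows.append(row)

def merge_manual_rows_py (primary_rows : List (List (String × String))) (supplemental_rows : List (List (String × String))) : List (List (String × String)) :=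
  let st := (primary_rows ++ supplemental_rows).foldl pvStepA (PySem.Dict.empty, [])
  st.2.map (fun e => match e with
    | Sum.inl k => (st.1.getD k PySem.Dict.empty).items  -- the appended object, after all later updates
    | Sum.inr r => r.items)

-- ===== PORT B =====
-- _row_key(row): str(row.get(...) or "").strip() — identical to stripping the string itself.
def pvRowKeyB (row : PySem.Dict String String) : String :=
  PySem.Str.strip (row.getD "episode_id" (row.getD "annotation_id" ""))

-- pass 1 body: build the key -> fully merged row table
def pvTStep (t : PySem.Dict String (PySem.Dict String String)) (row : PySem.Dict String String) :
    PySem.Dict String (PySem.Dict String String) :=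
  let key := pvRowKeyB row
  if key == "" then t
  else if t.contains key then t.insert key ((t.getD key PySem.Dict.empty).update row.items)  -- {**table[key], **row}
  else t.insert key row

-- pass 2 body: emit keyed rows at their first occurrence, keyless rows as-is
def pvEmitStep (table : PySem.Dict String (PySem.Dict String String))
    (acc : List (List (String × String)) × PySem.Set String) (row : PySem.Dict String String) :
    List (List (String × String)) × PySem.Set String :=
  let key := pvRowKeyB row
  if key == "" then (acc.1 ++ [row.items], acc.2)
  else if acc.2.contains key then acc
  else (acc.1 ++ [(table.getD key PySem.Dict.empty).items], acc.2.add key)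

def merge_manual_rows_py_alt (primary_rows : List (List (String × String))) (supplemental_rows : List (List (String × String))) : List (List (String × String)) :=
  let rows := (primary_rows ++ supplemental_rows).map (fun raw => PySem.Dict.ofList raw)
  let table := rows.foldl pvTStep PySem.Dict.empty
  (rows.foldl (pvEmitStep table) ([], PySem.Set.ofList [])).1

-- ===== PRECONDITION & SPEC =====
def Spec_merge_manual_rows_py (primary_rows : List (List (String × String))) (supplemental_rows : List (List (String × String))) (out : List (List (String × String))) : Prop := out = merge_manual_rows_py_alt primary_rows supplemental_rows
instance (primary_rows : List (List (String × String))) (supplemental_rows : List (List (String × String))) (out : List (List (String × String))) : Decidable (Spec_merge_manual_rows_py primary_rows supplemental_rows out) := by unfold Spec_merge_manual_rows_py; infer_instance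

-- ===== CLAIM (what is proved, stated in full; the proofs are below) =====
def Claim_equal_merge_manual_rows_py : Prop := ∀ (primary_rows : List (List (String × String))) (supplemental_rows : List (List (String × String))), Dom_merge_manual_rows_py primary_rows supplemental_rows → Spec_merge_manual_rows_py primary_rows supplemental_rows (merge_manual_rows_py primary_rows supplemental_rows)

-- ===== LEMMAS AND PROOFS =====

-- The two key functions agree.
theorem pvRowKeyA_eq (row : PySem.Dict String String) : pvRowKeyA row = pvRowKeyB row := by
  unfold pvRowKeyA pvToTextA pvRowKeyB
  by_cases h : PySem.Str.strip (row.getD "episode_id" (row.getD "annotation_id" "")) = "" <;>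
    simp [h]

-- A's step, re-expressed over the already-converted row (definitional).
def pvStepA' (st : PySem.Dict String (PySem.Dict String String) × List (String ⊕ PySem.Dict String String))
    (row : PySem.Dict String String) :
    PySem.Dict String (PySem.Dict String String) × List (String ⊕ PySem.Dict String String) :=
  let key := pvRowKeyA row
  if key != "" && st.1.contains key then
    (st.1.insert key ((st.1.getD key PySem.Dict.empty).update row.items), st.2)
  else if key != "" then
    (st.1.insert key row, st.2 ++ [Sum.inl key])
  else
    (st.1, st.2 ++ [Sum.inr row])

-- Skeleton of A's ordered_rows list, driven by the same table recursion as B's pass 1.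
def pvSkel (m : PySem.Dict String (PySem.Dict String String)) :
    List (PySem.Dict String String) → List (String ⊕ PySem.Dict String String)
  | [] => []
  | r :: rs =>
    let k := pvRowKeyB r
    (if k == "" then [Sum.inr r] else if m.contains k then [] else [Sum.inl k]) ++
      pvSkel (pvTStep m r) rs

-- A's fold = (B's pass-1 fold, accumulated skeleton).
theorem foldA_eq (rs : List (PySem.Dict String String)) :
    ∀ (m : PySem.Dict String (PySem.Dict String String)) (ord : List (String ⊕ PySem.Dict String String)),
    rs.foldl pvStepA' (m, ord) = (rs.foldl pvTStep m, ord ++ pvSkel m rs) := by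
  induction rs with
  | nil => intro m ord; simp [pvSkel]
  | cons r rs ih =>
    intro m ord
    by_cases h1 : pvRowKeyB r = ""
    · have hA : pvStepA' (m, ord) r = (m, ord ++ [Sum.inr r]) := by
        simp [pvStepA', pvRowKeyA_eq, h1]
      have hT : pvTStep m r = m := by simp [pvTStep, h1]
      simp [List.foldl_cons, hA, ih, pvSkel, h1, hT]
    · by_cases h2 : m.contains (pvRowKeyB r) = true
      · have hA : pvStepA' (m, ord) r = (pvTStep m r, ord) := by
          simp [pvStepA', pvRowKeyA_eq, pvTStep, h1, h2]
        simp [List.foldl_cons, hA, ih, pvSkel, h1, h2]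
      · have hA : pvStepA' (m, ord) r = (pvTStep m r, ord ++ [Sum.inl (pvRowKeyB r)]) := by
          simp [pvStepA', pvRowKeyA_eq, pvTStep, h1, h2]
        simp [List.foldl_cons, hA, ih, pvSkel, h1, h2]

-- B's pass-2 emission in recursive form.
def pvEmit (T : PySem.Dict String (PySem.Dict String String)) (seen : PySem.Set String) :
    List (PySem.Dict String String) → List (List (String × String))
  | [] => []
  | r :: rs =>
    let k := pvRowKeyB r
    if k == "" then r.items :: pvEmit T seen rs
    else if seen.contains k then pvEmit T seen rs
    else (T.getD k PySem.Dict.empty).items :: pvEmit T (seen.add k) rs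

theorem foldB_eq (T : PySem.Dict String (PySem.Dict String String)) (rs : List (PySem.Dict String String)) :
    ∀ (out : List (List (String × String))) (seen : PySem.Set String),
    (rs.foldl (pvEmitStep T) (out, seen)).1 = out ++ pvEmit T seen rs := by
  induction rs with
  | nil => intro out seen; simp [pvEmit]
  | cons r rs ih =>
    intro out seen
    by_cases h1 : pvRowKeyB r = ""
    · have hB : pvEmitStep T (out, seen) r = (out ++ [r.items], seen) := by
        simp [pvEmitStep, h1]
      simp [List.foldl_cons, hB, ih, pvEmit, h1]
    · by_cases h2 : pvRowKeyB r ∈ seen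
      · have hB : pvEmitStep T (out, seen) r = (out, seen) := by
          simp [pvEmitStep, h1, h2]
        simp [List.foldl_cons, hB, ih, pvEmit, h1, h2]
      · have hB : pvEmitStep T (out, seen) r =
            (out ++ [(T.getD (pvRowKeyB r) PySem.Dict.empty).items], seen.add (pvRowKeyB r)) := by
          simp [pvEmitStep, h1, h2]
        simp [List.foldl_cons, hB, ih, pvEmit, h1, h2]

-- Core: resolving the skeleton against the FINAL table is exactly B's pass-2 emission,
-- as long as the running table's keys and the seen set coincide.
theorem skel_emit (T : PySem.Dict String (PySem.Dict String String)) (rs : List (PySem.Dict String String)) :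
    ∀ (m : PySem.Dict String (PySem.Dict String String)) (seen : PySem.Set String),
    (∀ k, m.contains k = decide (k ∈ seen)) →
    (pvSkel m rs).map (fun e => match e with
      | Sum.inl k => (T.getD k PySem.Dict.empty).items
      | Sum.inr r => r.items) = pvEmit T seen rs := by
  induction rs with
  | nil => intro m seen _; simp [pvSkel, pvEmit]
  | cons r rs ih =>
    intro m seen hms
    by_cases h1 : pvRowKeyB r = ""
    · have hT : pvTStep m r = m := by simp [pvTStep, h1]
      simp [pvSkel, pvEmit, h1, hT, ih m seen hms]
    · by_cases h2 : pvRowKeyB r ∈ seen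
      · have h2c : m.contains (pvRowKeyB r) = true := by simp [hms, h2]
        have hnext : ∀ k, (pvTStep m r).contains k = decide (k ∈ seen) := by
          intro k
          simp only [pvTStep, beq_iff_eq, if_neg h1, h2c, if_true]
          rw [PySem.Dict.contains_insert]
          by_cases hk : k = pvRowKeyB r <;> simp [hk, h2, hms]
        simp [pvSkel, pvEmit, h1, h2, h2c, ih _ seen hnext]
      · have h2c : m.contains (pvRowKeyB r) = false := by simp [hms, h2]
        have hnext : ∀ k, (pvTStep m r).contains k = decide (k ∈ seen.add (pvRowKeyB r)) := by
          intro k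
          simp only [pvTStep, beq_iff_eq, if_neg h1, h2c, Bool.false_eq_true, if_false]
          rw [PySem.Dict.contains_insert]
          by_cases hk : k = pvRowKeyB r <;> simp [hk, hms, PySem.Set.mem_add]
        simp [pvSkel, pvEmit, h1, h2, h2c, ih _ _ hnext]

-- ===== VERDICT (by name: the statement is the Claim_ definition above) =====
theorem merge_manual_rows_py_spec : Claim_equal_merge_manual_rows_py := by
  intro p s _
  show merge_manual_rows_py p s = merge_manual_rows_py_alt p s
  unfold merge_manual_rows_py merge_manual_rows_py_alt
  have hmap : (p ++ s).foldl pvStepA (PySem.Dict.empty, []) =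
      ((p ++ s).map (fun raw => PySem.Dict.ofList raw)).foldl pvStepA' (PySem.Dict.empty, []) := by
    rw [List.foldl_map]
    rfl
  rw [hmap, foldA_eq]
  set rs := (p ++ s).map (fun raw => PySem.Dict.ofList raw) with hrs
  rw [foldB_eq]
  simp only [List.nil_append]
  exact skel_emit _ rs PySem.Dict.empty (PySem.Set.ofList []) (by
    intro k; simp [PySem.Dict.contains_empty, PySem.Set.ofList, PySem.Set.empty])
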